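-- pv_equiv track=rewrite | github.com/Ansemo/mintic-2022-actualizacion-world-craft-ascii-parte-3 | logica/jugador.py | validar_cdia
-- ===== SOURCE A (Python) =====
-- def validar_cdia(cdia):
--     if len(cdia) == 10:
--         mas = 0
--         k = 0
--         sinb = 0
--         for cont in cdia:
--             if cont == '+': mas += 1
--             if cont == 'k': k += 1
--             if cont == '?' or cont == '=' or cont == '&': sinb += 1
--         if cdia.find('@') + 1 == 6 and cdia[0] != cdia[9] and mas >= 1 and k <= 3 and sinb >= 1:
--             if not any(chr.isdigit() for chr in cdia):
--                 return True
--     return False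
-- ===== SOURCE B (Python) =====
-- def validar_cdia(cdia):
--     if len(cdia) != 10:
--         return False
--     return _scan(cdia, 0, False, 0, False, -1, cdia)
--
-- def _scan(rest, i, has_plus, ks, has_sin, at_pos, full):
--     if not rest:
--         return has_plus and has_sin and at_pos == 5 and full[0] != full[9]
--     c = rest[0]
--     if c.isdigit():
--         return False
--     if c == 'k':
--         if ks == 3:
--             return False
--         ks += 1
--     if c == '@' and at_pos == -1:
--         if i != 5:
--             return False
--         at_pos = i
--     return _scan(rest[1:], i + 1, has_plus or c == '+', ks, has_sin or c in '?=&', at_pos, full)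
-- ===== Notes on version B (the rewrite author's own statement) =====
-- stated objective: alternative
-- what changed: Replaces A's whole-string counting pass followed by one big conjunction test with a short-circuiting recursive state-machine scan that threads (index, plus-flag, k-count, special-char flag, first-@ position) and rejects immediately at the first violated rule (a digit, a fourth 'k', a first '@' off position 5), deciding the remaining conditions only at end of string.
import Mathlib
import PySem

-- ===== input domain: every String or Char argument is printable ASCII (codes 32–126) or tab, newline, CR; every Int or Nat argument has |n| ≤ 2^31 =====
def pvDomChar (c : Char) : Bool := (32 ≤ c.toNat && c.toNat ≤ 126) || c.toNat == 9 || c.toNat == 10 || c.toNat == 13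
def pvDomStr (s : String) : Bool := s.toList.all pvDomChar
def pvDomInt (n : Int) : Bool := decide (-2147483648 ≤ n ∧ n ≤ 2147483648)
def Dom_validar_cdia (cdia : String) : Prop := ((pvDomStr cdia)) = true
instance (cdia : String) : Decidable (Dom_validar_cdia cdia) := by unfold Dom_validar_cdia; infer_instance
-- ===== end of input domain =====

-- B replaces A's count-then-test pass by a short-circuiting recursive scan with early rejection (objective: alternative).

-- ===== PORT A =====
def validar_cdia (cdia : String) : Bool :=
  let l := cdia.toList
  if l.length == 10 then
    let st := l.foldl (fun (s : Int × Int × Int) cont =>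
      let s := if cont == '+' then (s.1 + 1, s.2.1, s.2.2) else s
      let s := if cont == 'k' then (s.1, s.2.1 + 1, s.2.2) else s
      if cont == '?' || cont == '=' || cont == '&' then (s.1, s.2.1, s.2.2 + 1) else s)
      ((0 : Int), (0 : Int), (0 : Int))
    if PySem.Chars.find l ['@'] + 1 == 6 && decide (PySem.Str.pyGet? cdia 0 ≠ PySem.Str.pyGet? cdia 9)
        && st.1 ≥ 1 && st.2.1 ≤ 3 && st.2.2 ≥ 1 then
      if !(l.any (fun c => PySem.Chars.isdigit c)) then true else false
    else false
  else false

-- ===== PORT B =====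
-- transliteration of _scan from Source B ('full' stays the whole string cdia)
def pvScan (full : String) : List Char → Int → Bool → Int → Bool → Int → Bool
  | [], _, has_plus, _, has_sin, at_pos =>
      has_plus && has_sin && (at_pos == 5)
        && decide (PySem.Str.pyGet? full 0 ≠ PySem.Str.pyGet? full 9)
  | c :: rest, i, has_plus, ks, has_sin, at_pos =>
      if PySem.Chars.isdigit c then false
      else if c == 'k' && ks == 3 then false
      else
        let ks := if c == 'k' then ks + 1 else ks
        if c == '@' && at_pos == -1 then
          if i ≠ 5 then false
          else pvScan full rest (i + 1) (has_plus || c == '+') ks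
                 (has_sin || PySem.Chars.isIn [c] ['?', '=', '&']) i
        else pvScan full rest (i + 1) (has_plus || c == '+') ks
               (has_sin || PySem.Chars.isIn [c] ['?', '=', '&']) at_pos

def validar_cdia_alt (cdia : String) : Bool :=
  if cdia.toList.length ≠ 10 then false
  else pvScan cdia cdia.toList 0 false 0 false (-1)

-- ===== PRECONDITION & SPEC =====
def Spec_validar_cdia (cdia : String) (out : Bool) : Prop := out = validar_cdia_alt cdia
instance (cdia : String) (out : Bool) : Decidable (Spec_validar_cdia cdia out) := by unfold Spec_validar_cdia; infer_instance

-- ===== CLAIM (what is proved, stated in full; the proofs are below) =====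
def Claim_equal_validar_cdia : Prop := ∀ (cdia : String), Dom_validar_cdia cdia → Spec_validar_cdia cdia (validar_cdia cdia)

-- ===== LEMMAS AND PROOFS =====

-- closed form of A's counting fold
theorem pv_fold_counters (l : List Char) (a b c : Int) :
    l.foldl (fun (s : Int × Int × Int) cont =>
      let s := if cont == '+' then (s.1 + 1, s.2.1, s.2.2) else s
      let s := if cont == 'k' then (s.1, s.2.1 + 1, s.2.2) else s
      if cont == '?' || cont == '=' || cont == '&' then (s.1, s.2.1, s.2.2 + 1) else s)
      (a, b, c)
    = (a + l.count '+', b + l.count 'k',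
       c + (l.countP (fun x => x == '?' || x == '=' || x == '&') : Int)) := by
  induction l generalizing a b c with
  | nil => simp
  | cons x xs ih =>
    simp only [List.foldl_cons, List.count_cons, List.countP_cons]
    rw [ih]
    by_cases h1 : x = '+' <;> by_cases h2 : x = 'k' <;>
      by_cases h3 : (x == '?' || x == '=' || x == '&') = true <;>
      simp_all <;> ring_nf

theorem pv_singleton_prefix (c : Char) (l : List Char) :
    [c] <+: l ↔ l.head? = some c := by
  constructor
  · rintro ⟨t, rfl⟩; rfl
  · intro h
    cases l with
    | nil => simp at h
    | cons x xs => simp at h; exact ⟨xs, by simp [h]⟩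

theorem pv_infix_singleton (c : Char) (l : List Char) : [c] <:+: l ↔ c ∈ l := by
  constructor
  · intro h; exact h.sublist.subset (by simp)
  · intro h
    obtain ⟨s, t, rfl⟩ := List.append_of_mem h
    exact ⟨s, t, by simp⟩

theorem pv_isIn_singleton (c : Char) (l : List Char) :
    PySem.Chars.isIn [c] l = true ↔ c ∈ l := by
  rw [PySem.Chars.isIn_iff_infix]
  exact pv_infix_singleton c l


-- find of a single character = its first index (or -1)
theorem pv_find_singleton (c : Char) (l : List Char) :
    PySem.Chars.find l [c] = (match l.idxOf? c with
      | some j => (j : Int)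
      | none => -1) := by
  cases h : l.idxOf? c with
  | none =>
    have hmem : c ∉ l := List.idxOf?_eq_none_iff.mp h
    have : ¬ [c] <:+: l := fun hc => hmem ((pv_infix_singleton c l).mp hc)
    simpa using (PySem.Chars.find_eq_neg_one_iff l [c]).mpr this
  | some j =>
    obtain ⟨hj, hget, hmin⟩ := List.idxOf?_eq_some_iff.mp h
    have hmem : c ∈ l := by rw [← hget]; exact List.getElem_mem hj
    have hin : [c] <:+: l := (pv_infix_singleton c l).mpr hmem
    have hf0 : 0 ≤ PySem.Chars.find l [c] := (PySem.Chars.find_nonneg_iff l [c]).mpr hin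
    obtain ⟨hpre, hbefore⟩ := PySem.Chars.find_spec hf0
    have hfj : (PySem.Chars.find l [c]).toNat = j := by
      have hat : l[(PySem.Chars.find l [c]).toNat]? = some c := by
        have := (pv_singleton_prefix c _).mp hpre
        rwa [List.head?_drop] at this
      by_contra hne
      rcases Nat.lt_or_ge (PySem.Chars.find l [c]).toNat j with hlt | hge
      · have hlen : (PySem.Chars.find l [c]).toNat < l.length := Nat.lt_trans hlt hj
        have : l[(PySem.Chars.find l [c]).toNat] = c := by
          have := hat; rwa [List.getElem?_eq_getElem hlen, Option.some_inj] at this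
        exact hmin _ hlt this
      · have hjlt : j < (PySem.Chars.find l [c]).toNat := by omega
        exact hbefore j hjlt ((pv_singleton_prefix c _).mpr (by rw [List.head?_drop, List.getElem?_eq_getElem hj, hget]))
    show PySem.Chars.find l [c] = (j : Int)
    omega

-- the '@'-position component of B's scan result
def pvAtOk (i at_pos : Int) (l : List Char) : Bool :=
  if at_pos == -1 then
    match l.idxOf? '@' with
    | some j => decide (i + (j : Int) = 5)
    | none => false
  else decide (at_pos = 5)

-- closed form of B's scan
theorem pv_scan_eq (full : String) (l : List Char) (i : Int) (hp : Bool) (ks : Int) (hs : Bool)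
    (ap : Int) (h0 : 0 ≤ ks) (h3 : ks ≤ 3) :
    pvScan full l i hp ks hs ap =
      (!(l.any (fun c => PySem.Chars.isdigit c))
       && decide (ks + (l.count 'k' : Int) ≤ 3)
       && (hp || l.contains '+')
       && (hs || l.any (fun c => PySem.Chars.isIn [c] ['?', '=', '&']))
       && pvAtOk i ap l
       && decide (PySem.Str.pyGet? full 0 ≠ PySem.Str.pyGet? full 9)) := by
  induction l generalizing i hp ks hs ap with
  | nil =>
    simp only [pvScan, pvAtOk, List.any_nil, List.count_nil, List.contains_eq_mem,
      List.idxOf?_nil, Bool.not_false, Nat.cast_zero, List.not_mem_nil, decide_false,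
      Bool.or_false, Bool.true_and, add_zero]
    rw [decide_eq_true h3]
    by_cases hap : ap = -1
    · have h5 : (ap == (5 : Int)) = false := by simp [hap]
      simp [hap, h5]
    · by_cases h5 : ap = 5 <;> simp [hap, h5]
  | cons c rest ih =>
    by_cases hdig : PySem.Chars.isdigit c = true
    · simp [pvScan, hdig]
    · by_cases hkexit : (c == 'k' && ks == 3) = true
      · have hc : c = 'k' ∧ ks = 3 := by simpa using hkexit
        have hcnt : decide (ks + ((List.count 'k' (c :: rest) : Nat) : Int) ≤ 3) = false := by
          rw [decide_eq_false_iff_not, List.count_cons]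
          simp only [hc.1, beq_self_eq_true, if_pos]
          push_cast
          have : (0 : Int) ≤ (List.count 'k' rest : Int) := by positivity
          omega
        simp [pvScan, hdig, hkexit, hcnt]
      · have hkb : (c == 'k' && ks == 3) = false := by simpa using hkexit
        have hks' : 0 ≤ (if c == 'k' then ks + 1 else ks) ∧ (if c == 'k' then ks + 1 else ks) ≤ 3 := by
          by_cases hck : c = 'k'
          · have : ¬ ks = 3 := by intro h; simp [hck, h] at hkb
            simp [hck]; omega
          · simp [hck]; omega
        by_cases hat : (c == '@' && ap == -1) = true
        · obtain ⟨hc, hap⟩ : c = '@' ∧ ap = -1 := by simpa using hat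
          subst hc; subst hap
          by_cases hi : i = 5
          · subst hi
            have hstep : pvScan full ('@' :: rest) 5 hp ks hs (-1)
                = pvScan full rest (5 + 1) (hp || ('@' == '+'))
                    (if '@' == 'k' then ks + 1 else ks)
                    (hs || PySem.Chars.isIn ['@'] ['?', '=', '&']) 5 := by
              simp [pvScan, hdig]
            rw [hstep, ih _ _ _ _ _ hks'.1 hks'.2]
            have h1 : pvAtOk (5 + 1) 5 rest = true := by simp [pvAtOk]
            have h2 : pvAtOk 5 (-1) ('@' :: rest) = true := by
              simp [pvAtOk, List.idxOf?_cons]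
            rw [h1, h2]
            simp [List.any_cons, List.contains_eq_mem,
              (by decide : PySem.Chars.isIn ['@'] ['?', '=', '&'] = false),
              (by decide : PySem.Chars.isdigit '@' = false)]
          · have hstep : pvScan full ('@' :: rest) i hp ks hs (-1) = false := by
              simp [pvScan, hdig, hi]
            have h2 : pvAtOk i (-1) ('@' :: rest) = false := by
              simp [pvAtOk, List.idxOf?_cons, hi]
            simp [hstep, h2]
        · have hstep : pvScan full (c :: rest) i hp ks hs ap
            = pvScan full rest (i + 1) (hp || (c == '+'))
                (if c == 'k' then ks + 1 else ks)
                (hs || PySem.Chars.isIn [c] ['?', '=', '&']) ap := by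
            simp only [pvScan]
            rw [if_neg hdig, if_neg (by simp [hkb]), if_neg (by simp [hat])]
          rw [hstep, ih _ _ _ _ _ hks'.1 hks'.2]
          have hatok : pvAtOk (i + 1) ap rest = pvAtOk i ap (c :: rest) := by
            by_cases hap : ap = -1
            · have hcat : (c == '@') = false := by
                by_cases hc' : c = '@'
                · exfalso; exact hat (by simp [hc', hap])
                · simp [hc']
              simp only [pvAtOk, hap, beq_self_eq_true, if_pos, List.idxOf?_cons, hcat,
                Bool.false_eq_true]
              cases hio : rest.idxOf? '@' with
              | none => simp
              | some j =>
                have hji : i + 1 + (j : Int) = i + (((j : Nat) + 1 : Nat) : Int) := by push_cast; ring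
                simp [hji]
            · have h' : (ap == -1) = false := by simp [hap]
              simp [pvAtOk, h']
          rw [hatok]
          have hcount : (if c == 'k' then ks + 1 else ks) + ((List.count 'k' rest : Nat) : Int)
              = ks + ((List.count 'k' (c :: rest) : Nat) : Int) := by
            rw [List.count_cons]
            by_cases hck : c = 'k' <;> simp [hck] <;> push_cast <;> ring
          rw [hcount]
          have hplus : ((hp || c == '+') || rest.contains '+') = (hp || (c :: rest).contains '+') := by
            have : (c == '+') = decide (c = '+') := by
              cases h : c == '+' <;> simp_all
            simp [List.contains_eq_mem, Bool.or_assoc, eq_comm, this]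
          have hsin : ((hs || PySem.Chars.isIn [c] ['?', '=', '&'])
              || rest.any (fun c => PySem.Chars.isIn [c] ['?', '=', '&']))
              = (hs || (c :: rest).any (fun c => PySem.Chars.isIn [c] ['?', '=', '&'])) := by
            simp [List.any_cons, Bool.or_assoc]
          rw [hplus, hsin]
          simp [List.any_cons, hdig]

-- ===== VERDICT (by name: the statement is the Claim_ definition above) =====
theorem validar_cdia_spec : Claim_equal_validar_cdia := by
  intro cdia _
  unfold Spec_validar_cdia validar_cdia validar_cdia_alt
  simp only [pv_fold_counters, zero_add]
  set l := cdia.toList with hl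
  by_cases hlen : l.length = 10
  · rw [if_pos (by simp [hlen] : (l.length == 10) = true)]
    rw [if_neg (not_not_intro hlen)]
    rw [pv_scan_eq cdia l 0 false 0 false (-1) (by norm_num) (by norm_num)]
    simp only [zero_add, Bool.false_or]
    have hplus : decide ((1 : Int) ≤ (l.count '+' : Int)) = l.contains '+' := by
      rcases Bool.eq_false_or_eq_true (l.contains '+') with h | h
      · rw [h]
        have hm : '+' ∈ l := by simpa [List.contains_eq_mem] using h
        exact decide_eq_true (by exact_mod_cast List.count_pos_iff.mpr hm)
      · rw [h]
        have h0 : '+' ∉ l := by simpa [List.contains_eq_mem] using h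
        have h1 : l.count '+' = 0 := List.count_eq_zero_of_not_mem h0
        exact decide_eq_false (by simp [h1])
    have hsinb : decide ((1 : Int) ≤ ((l.countP (fun x => x == '?' || x == '=' || x == '&') : Nat) : Int))
        = (l.any (fun c => PySem.Chars.isIn [c] ['?', '=', '&'])) := by
      rcases Bool.eq_false_or_eq_true (l.any (fun c => PySem.Chars.isIn [c] ['?', '=', '&'])) with h | h
      · rw [h]
        simp only [List.any_eq_true] at h
        obtain ⟨c, hc, hcl⟩ := h
        have hcl' : c ∈ (['?', '=', '&'] : List Char) := (pv_isIn_singleton _ _).mp hcl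
        have : 0 < l.countP (fun x => x == '?' || x == '=' || x == '&') := by
          rw [List.countP_pos_iff]
          refine ⟨c, hc, ?_⟩
          simp only [List.mem_cons, List.not_mem_nil, or_false] at hcl'
          rcases hcl' with rfl | rfl | rfl <;> simp
        exact decide_eq_true (by exact_mod_cast this)
      · rw [h]
        simp only [List.any_eq_false] at h
        have : l.countP (fun x => x == '?' || x == '=' || x == '&') = 0 := by
          rw [List.countP_eq_zero]
          intro x hx hpx
          have hxm : x ∈ (['?', '=', '&'] : List Char) := by
            simp only [Bool.or_eq_true, beq_iff_eq] at hpx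
            rcases hpx with (rfl | rfl) | rfl <;> simp
          exact absurd ((pv_isIn_singleton x _).mpr hxm) (by simpa using h x hx)
        exact decide_eq_false (by simp [this])
    have hfind : (PySem.Chars.find l ['@'] + 1 == 6) = pvAtOk 0 (-1) l := by
      rw [pv_find_singleton]
      cases hio : l.idxOf? '@' with
      | none => simp [pvAtOk, hio]
      | some j =>
        simp only [pvAtOk, beq_self_eq_true, if_pos, hio]
        cases hd : (((j : Int) + 1) == 6) <;> cases he : decide ((0 : Int) + (j : Int) = 5) <;>
          simp_all <;> omega
    rw [hfind, hplus, hsinb]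
    cases h1 : pvAtOk 0 (-1) l <;>
      cases h2 : decide (PySem.Str.pyGet? cdia 0 ≠ PySem.Str.pyGet? cdia 9) <;>
      cases h3 : l.contains '+' <;>
      cases h4 : decide ((l.count 'k' : Int) ≤ 3) <;>
      cases h5 : l.any (fun c => PySem.Chars.isIn [c] ['?', '=', '&']) <;>
      cases h6 : l.any (fun c => PySem.Chars.isdigit c) <;>
      simp_all
  · rw [if_neg (by simp [hlen] : ¬ (l.length == 10) = true)]
    rw [if_pos hlen]
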